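-- pv_equiv track=rewrite | github.com/liza0525/algorithm-study | Programmers/kakao/무지의먹방라이브.py | solution
-- ===== SOURCE A (Python) =====
-- def solution(food_times, k):
--     if sum(food_times) <= k:
--         return -1
--     foods = [[dish_num, amount] for dish_num, amount in enumerate(food_times)]
--     foods = sorted(foods, key=lambda x: x[1])
--     n = len(foods)
--
--     pre_amount, i = 0, 0
--     while True:
--         amount = foods[i][1]
--         reduce_amount = (amount - pre_amount) * (n - i)
--         if reduce_amount >= k:
--             break
--         else:
--             k -= reduce_amount
--             pre_amount, i = amount, i+1
--     foods = sorted(foods[i:])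
--     return foods[k % len(foods)][0] + 1
-- ===== SOURCE B (Python) =====
-- def solution(food_times, k):
--     if sum(food_times) <= k:
--         return -1
--     foods = sorted(([i, t] for i, t in enumerate(food_times)), key=lambda x: x[1])
--     n = len(foods)
--     # cumulative thresholds: acc[j] = seconds needed to fully clear the first j sorted layers
--     acc = [0]
--     prev, m = 0, n
--     for _, amount in foods:
--         acc.append(acc[-1] + (amount - prev) * m)
--         prev, m = amount, m - 1
--     # binary search for the least layer index whose threshold reaches k
--     lo, hi = 0, n - 1
--     while lo < hi:
--         mid = (lo + hi) // 2
--         if acc[mid + 1] >= k: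
--             hi = mid
--         else:
--             lo = mid + 1
--     rest = sorted(foods[lo:])
--     return rest[(k - acc[lo]) % len(rest)][0] + 1
-- ===== Notes on version B (the rewrite author's own statement) =====
-- stated objective: alternative
-- what changed: A's incremental accumulate-and-break loop over the amount-sorted dishes is replaced by an explicitly built cumulative-threshold array that is binary-searched for the first layer whose clearing time reaches k.
import Mathlib
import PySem

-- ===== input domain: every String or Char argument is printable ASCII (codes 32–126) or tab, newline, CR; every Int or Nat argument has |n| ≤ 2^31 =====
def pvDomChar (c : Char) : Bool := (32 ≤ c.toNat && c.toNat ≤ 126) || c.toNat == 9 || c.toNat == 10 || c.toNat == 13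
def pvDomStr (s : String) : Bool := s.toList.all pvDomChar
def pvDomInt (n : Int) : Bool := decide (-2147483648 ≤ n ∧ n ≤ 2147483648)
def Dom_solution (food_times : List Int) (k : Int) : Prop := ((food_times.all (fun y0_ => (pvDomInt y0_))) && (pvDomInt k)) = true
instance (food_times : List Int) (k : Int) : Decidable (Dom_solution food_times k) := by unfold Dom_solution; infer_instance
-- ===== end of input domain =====

-- B replaces A's incremental accumulate-and-break loop by an explicit cumulative-threshold
-- array searched with binary search (objective: alternative decomposition; same sort-dominated cost).

-- ===== PORT A =====
-- the 'while True' loop: walks the amount-sorted list, index i, previous amount pre, remaining k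
def solutionLoop (n : Int) : List (Int × Int) → Int → Int → Int → Int × Int
  | [], i, _, k => (i, k)   -- Python raises IndexError here; unreachable under Pre_
  | (_, amount) :: rest, i, pre, k =>
      if (amount - pre) * (n - i) ≥ k then (i, k)
      else solutionLoop n rest (i + 1) amount (k - (amount - pre) * (n - i))

def solution (food_times : List Int) (k : Int) : Int :=
  if food_times.sum ≤ k then -1 else
  let foods := PySem.List.sorted (PySem.List.enumerate food_times) (fun x => x.2) false
  let n := PySem.List.len foods
  let r := solutionLoop n foods 0 0 k
  let rest := PySem.List.sorted2 (PySem.List.slice foods (some r.1) none) (fun x => x.1) (fun x => x.2) false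
  match PySem.List.pyGet? rest (PySem.Int.mod r.2 (PySem.List.len rest)) with
  | some p => p.1 + 1
  | none => 0  -- Python raises IndexError here; unreachable under Pre_

-- ===== PORT B =====
-- binary search: while lo < hi: mid = (lo+hi)//2; if acc[mid+1] >= k: hi = mid else lo = mid+1
def bsLoop (acc : List Int) (k lo hi : Int) : Int :=
  if h : lo < hi then
    if PySem.List.pyGetD acc (PySem.Int.floordiv (lo + hi) 2 + 1) 0 ≥ k then
      bsLoop acc k lo (PySem.Int.floordiv (lo + hi) 2)
    else
      bsLoop acc k (PySem.Int.floordiv (lo + hi) 2 + 1) hi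
  else lo
termination_by (hi - lo).toNat
decreasing_by
  · have h2 := (PySem.Int.floordiv_lt_iff_lt_mul (a := lo + hi) (b := 2) (q := hi) (by omega)).2 (by omega)
    omega
  · have h1 := PySem.Int.floordiv_two_mid_bounds (le_of_lt h)
    omega

def solution_alt (food_times : List Int) (k : Int) : Int :=
  if food_times.sum ≤ k then -1 else
  let foods := PySem.List.sorted (PySem.List.enumerate food_times) (fun x => x.2) false
  let n := PySem.List.len foods
  -- acc[j] = seconds to fully clear the first j sorted layers (built left to right)
  let st := foods.foldl (fun (st : List Int × Int × Int) p =>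
      (st.1 ++ [PySem.List.pyGetD st.1 (-1) 0 + (p.2 - st.2.1) * st.2.2], p.2, st.2.2 - 1))
      ([0], 0, n)
  let acc := st.1
  let lo := bsLoop acc k 0 (n - 1)
  let rest := PySem.List.sorted2 (PySem.List.slice foods (some lo) none) (fun x => x.1) (fun x => x.2) false
  match PySem.List.pyGet? rest (PySem.Int.mod (k - PySem.List.pyGetD acc lo 0) (PySem.List.len rest)) with
  | some p => p.1 + 1
  | none => 0  -- Python raises IndexError here; unreachable under Pre_

-- ===== PRECONDITION & SPEC =====
-- Pre_ excludes only (food_times = [] with k < 0), the sole case where the Python A raises (IndexError).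
def Pre_solution (food_times : List Int) (k : Int) : Prop := food_times ≠ [] ∨ 0 ≤ k
instance (food_times : List Int) (k : Int) : Decidable (Pre_solution food_times k) := by unfold Pre_solution; infer_instance
def pvWitness_solution : List Int × Int := ([3, 1, 2], 5)

def Spec_solution (food_times : List Int) (k : Int) (out : Int) : Prop := out = solution_alt food_times k
instance (food_times : List Int) (k : Int) (out : Int) : Decidable (Spec_solution food_times k out) := by unfold Spec_solution; infer_instance

-- ===== CLAIM (what is proved, stated in full; the proofs are below) =====
def Claim_equal_solution : Prop := ∀ (food_times : List Int) (k : Int), Dom_solution food_times k → Pre_solution food_times k → Spec_solution food_times k (solution food_times k)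

-- ===== LEMMAS AND PROOFS =====

-- spec of the threshold list: acc with its leading base element b stripped
def accTail : List (Int × Int) → Int → Int → List Int
  | [], _, _ => []
  | (_, a) :: r, pre, b =>
      (b + (a - pre) * ((r.length : Int) + 1)) :: accTail r a (b + (a - pre) * ((r.length : Int) + 1))

theorem accTail_length (fs : List (Int × Int)) (pre b : Int) :
    (accTail fs pre b).length = fs.length := by
  induction fs generalizing pre b with
  | nil => rfl
  | cons hd tl ih => cases hd; simp [accTail, ih]

theorem accTail_add (fs : List (Int × Int)) (pre c b : Int) :
    accTail fs pre (c + b) = (accTail fs pre c).map (· + b) := by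
  induction fs generalizing pre c with
  | nil => rfl
  | cons hd tl ih =>
    cases hd with
    | mk d a =>
      simp only [accTail, List.map_cons, List.cons.injEq]
      constructor
      · ring
      · have : c + b + (a - pre) * ((tl.length : Int) + 1)
            = (c + (a - pre) * ((tl.length : Int) + 1)) + b := by ring
        rw [this, ih]

theorem fold_acc_eq (fs : List (Int × Int)) (A0 : List Int) (b pre : Int) :
    (fs.foldl (fun (st : List Int × Int × Int) p =>
      (st.1 ++ [PySem.List.pyGetD st.1 (-1) 0 + (p.2 - st.2.1) * st.2.2], p.2, st.2.2 - 1))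
      (A0 ++ [b], pre, (fs.length : Int))).1 = (A0 ++ [b]) ++ accTail fs pre b := by
  induction fs generalizing A0 b pre with
  | nil => simp [accTail]
  | cons hd tl ih =>
    cases hd with
    | mk d a =>
      simp only [List.foldl_cons, PySem.List.pyGetD_neg_one_append_singleton, accTail,
        List.length_cons]
      push_cast
      have harith : (tl.length : Int) + 1 - 1 = (tl.length : Int) := by ring
      rw [harith, ih (A0 ++ [b]) (b + (a - pre) * ((tl.length : Int) + 1)) a]
      simp

theorem accTail_ge_base (fs : List (Int × Int)) (pre b : Int)
    (hpre : ∀ q ∈ fs, pre ≤ q.2) (hp : fs.Pairwise (fun p q => p.2 ≤ q.2)) :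
    ∀ y ∈ accTail fs pre b, b ≤ y := by
  induction fs generalizing pre b with
  | nil => simp [accTail]
  | cons hd tl ih =>
    cases hd with
    | mk d a =>
      intro y hy
      have ha : pre ≤ a := hpre (d, a) (by simp)
      have hx0 : b ≤ b + (a - pre) * ((tl.length : Int) + 1) := by
        have : (0:Int) ≤ (a - pre) * ((tl.length : Int) + 1) :=
          mul_nonneg (by omega) (by positivity)
        omega
      simp only [accTail, List.mem_cons] at hy
      rcases hy with rfl | hy
      · exact hx0
      · have := ih a (b + (a - pre) * ((tl.length : Int) + 1))
          (fun q hq => (List.pairwise_cons.mp hp).1 q hq)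
          (List.pairwise_cons.mp hp).2 y hy
        omega

theorem accTail_pairwise (fs : List (Int × Int)) (pre b : Int)
    (hp : fs.Pairwise (fun p q => p.2 ≤ q.2)) :
    (accTail fs pre b).Pairwise (· ≤ ·) := by
  induction fs generalizing pre b with
  | nil => simp [accTail]
  | cons hd tl ih =>
    cases hd with
    | mk d a =>
      rcases List.pairwise_cons.mp hp with ⟨hhd, htl⟩
      simp only [accTail, List.pairwise_cons]
      exact ⟨accTail_ge_base tl a _ hhd htl, ih a _ htl⟩

theorem accTail_last (fs : List (Int × Int)) (pre b : Int) (h : fs ≠ []) :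
    (accTail fs pre b).getD (fs.length - 1) 0 = b + (fs.map (·.2)).sum - pre * fs.length := by
  induction fs generalizing pre b with
  | nil => simp at h
  | cons hd tl ih =>
    cases hd with
    | mk d a =>
      by_cases htl : tl = []
      · subst htl; simp [accTail]; ring
      · have hlen : 1 ≤ tl.length := List.length_pos_iff.mpr htl
        have hidx : ((d, a) :: tl).length - 1 = (tl.length - 1) + 1 := by
          simp [List.length_cons]; omega
        rw [hidx]
        simp only [accTail, List.getD_cons_succ]
        rw [ih a _ htl]
        simp only [List.map_cons, List.sum_cons, List.length_cons]
        push_cast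
        ring

theorem loop_spec (n : Int) (fs : List (Int × Int)) (i pre kk : Int) (j0 : Nat)
    (hlen : n - i = (fs.length : Int))
    (hj0 : j0 < fs.length)
    (hge : kk ≤ (accTail fs pre 0).getD j0 0)
    (hlt : ∀ j < j0, (accTail fs pre 0).getD j 0 < kk) :
    solutionLoop n fs i pre kk =
      (i + j0, kk - (if j0 = 0 then 0 else (accTail fs pre 0).getD (j0 - 1) 0)) := by
  induction fs generalizing i pre kk j0 with
  | nil => simp at hj0
  | cons hd tl ih =>
    cases hd with
    | mk d a =>
      have hni : n - i = (tl.length : Int) + 1 := by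
        rw [hlen]; simp only [List.length_cons]; push_cast; ring
      have hx0 : (a - pre) * (n - i) = (a - pre) * ((tl.length : Int) + 1) := by rw [hni]
      by_cases hbr : (a - pre) * (n - i) ≥ kk
      · -- break at this element: j0 must be 0
        have hj00 : j0 = 0 := by
          by_contra hne
          have := hlt 0 (Nat.pos_of_ne_zero hne)
          simp only [accTail, List.getD_cons_zero, zero_add] at this
          omega
        subst hj00
        simp [solutionLoop, hbr]
      · have hx0lt : (a - pre) * ((tl.length : Int) + 1) < kk := by omega
        have hj0ne : j0 ≠ 0 := by
          intro h0; subst h0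
          simp only [accTail, List.getD_cons_zero, zero_add] at hge
          omega
        obtain ⟨j1, rfl⟩ : ∃ j1, j0 = j1 + 1 := ⟨j0 - 1, by omega⟩
        have hT : accTail ((d, a) :: tl) pre 0 =
            (0 + (a - pre) * ((tl.length : Int) + 1)) ::
              (accTail tl a 0).map (· + (a - pre) * ((tl.length : Int) + 1)) := by
          simp only [accTail]
          congr 1
          exact accTail_add tl a 0 ((a - pre) * ((tl.length : Int) + 1))
        have hj1 : j1 < tl.length := by
          simpa [List.length_cons] using hj0
        have hj1' : j1 < (accTail tl a 0).length := by rw [accTail_length]; exact hj1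
        have hgetmap : ∀ m, m < tl.length →
            ((accTail tl a 0).map (· + (a - pre) * ((tl.length : Int) + 1))).getD m 0
              = (accTail tl a 0).getD m 0 + (a - pre) * ((tl.length : Int) + 1) := by
          intro m hm
          have hm' : m < (accTail tl a 0).length := by rw [accTail_length]; exact hm
          rw [List.getD_eq_getElem _ _ (by simpa using hm'),
              List.getD_eq_getElem _ _ hm', List.getElem_map]
        have hge' : kk - (a - pre) * ((tl.length : Int) + 1) ≤ (accTail tl a 0).getD j1 0 := by
          have := hge
          rw [hT] at this
          simp only [List.getD_cons_succ] at this
          rw [hgetmap j1 hj1] at this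
          omega
        have hlt' : ∀ j < j1, (accTail tl a 0).getD j 0 < kk - (a - pre) * ((tl.length : Int) + 1) := by
          intro j hj
          have := hlt (j + 1) (by omega)
          rw [hT] at this
          simp only [List.getD_cons_succ] at this
          rw [hgetmap j (by omega)] at this
          omega
        have hrec := ih (i + 1) a (kk - (a - pre) * ((tl.length : Int) + 1)) j1
          (by omega) hj1 hge' hlt'
        have hloop : solutionLoop n ((d, a) :: tl) i pre kk
            = solutionLoop n tl (i + 1) a (kk - (a - pre) * (n - i)) := by
          simp [solutionLoop, hbr]
        rw [hloop, hx0, hrec]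
        simp only [Prod.mk.injEq]
        constructor
        · push_cast; ring
        · rw [hT]
          by_cases hj10 : j1 = 0
          · subst hj10; simp
          · simp only [hj10, if_false, if_neg (by omega : ¬ j1 + 1 = 0)]
            have : (j1 + 1 - 1) = (j1 - 1) + 1 := by omega
            rw [this, List.getD_cons_succ, hgetmap (j1 - 1) (by omega)]
            ring

theorem bs_spec (T : List Int) (k : Int) (lo hi j0 : Int)
    (h0 : 0 ≤ lo) (h1 : lo ≤ j0) (h2 : j0 ≤ hi) (h3 : hi < (T.length : Int))
    (hlt : ∀ j : Int, lo ≤ j → j < j0 → T.getD j.toNat 0 < k)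
    (hge : ∀ j : Int, j0 ≤ j → j ≤ hi → k ≤ T.getD j.toNat 0) :
    bsLoop (0 :: T) k lo hi = j0 := by
  have main : ∀ (m : Nat) (lo hi j0 : Int), (hi - lo).toNat ≤ m →
      0 ≤ lo → lo ≤ j0 → j0 ≤ hi → hi < (T.length : Int) →
      (∀ j : Int, lo ≤ j → j < j0 → T.getD j.toNat 0 < k) →
      (∀ j : Int, j0 ≤ j → j ≤ hi → k ≤ T.getD j.toNat 0) →
      bsLoop (0 :: T) k lo hi = j0 := by
    intro m
    induction m with
    | zero =>
      intro lo hi j0 hm h0 h1 h2 h3 hlt hge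
      rw [bsLoop, dif_neg (by omega)]
      omega
    | succ m ih =>
      intro lo hi j0 hm h0 h1 h2 h3 hlt hge
      by_cases hlh : lo < hi
      · have hmid := PySem.Int.floordiv_two_mid_bounds (le_of_lt hlh)
        have hmlt : PySem.Int.floordiv (lo + hi) 2 < hi :=
          (PySem.Int.floordiv_lt_iff_lt_mul (by omega)).2 (by omega)
        set mid := PySem.Int.floordiv (lo + hi) 2 with hmid_def
        have hlenc : ((0 :: T).length : Int) = (T.length : Int) + 1 := by
          simp [List.length_cons]
        have hpg : PySem.List.pyGetD (0 :: T) (mid + 1) 0 = T.getD mid.toNat 0 := by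
          rw [PySem.List.pyGetD_of_nonneg (0 :: T) 0 (by omega)]
          have htn : (mid + 1).toNat = mid.toNat + 1 := by omega
          rw [htn, List.getD_cons_succ]
        rw [bsLoop, dif_pos hlh, ← hmid_def, hpg]
        by_cases hP : k ≤ T.getD mid.toNat 0
        · rw [if_pos (by omega)]
          have hj0mid : j0 ≤ mid := by
            by_contra hc
            have := hlt mid (by omega) (by omega)
            omega
          exact ih lo mid j0 (by omega) h0 h1 hj0mid (by omega) hlt
            (fun j hj1 hj2 => hge j hj1 (by omega))
        · rw [if_neg (by omega)]
          have hj0mid : mid < j0 := by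
            by_contra hc
            have := hge mid (by omega) (by omega)
            omega
          exact ih (mid + 1) hi j0 (by omega) (by omega) (by omega) h2 h3
            (fun j hj1 hj2 => hlt j (by omega) hj2) hge
      · rw [bsLoop, dif_neg hlh]
        omega
  exact main (hi - lo).toNat lo hi j0 le_rfl h0 h1 h2 h3 hlt hge

theorem main_eq (ft : List Int) (k : Int) (hpre : Pre_solution ft k) :
    solution ft k = solution_alt ft k := by
  by_cases hs : ft.sum ≤ k
  · unfold solution solution_alt
    rw [if_pos hs, if_pos hs]
  · have hft : ft ≠ [] := by
      rcases hpre with h | h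
      · exact h
      · intro h0; subst h0; simp at hs; omega
    unfold solution solution_alt
    rw [if_neg hs, if_neg hs]
    simp only [PySem.List.len_eq]
    set foods := PySem.List.sorted (PySem.List.enumerate ft) (fun x => x.2) false with hfoods
    have hflen : foods.length = ft.length := by
      rw [hfoods, PySem.List.length_sorted, PySem.List.length_enumerate]
    have hfne : foods ≠ [] := by
      intro h0
      apply hft
      have := hflen
      rw [h0] at this
      exact List.length_eq_zero_iff.mp this.symm
    have hn1 : 1 ≤ foods.length := List.length_pos_iff.mpr hfne
    set n := foods.length with hn
    set T := accTail foods 0 0 with hT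
    have hTlen : T.length = n := accTail_length foods 0 0
    have hpair : foods.Pairwise (fun p q => p.2 ≤ q.2) := by
      rw [hfoods]
      exact PySem.List.sorted_pairwise _ _
    have hsum : (foods.map (·.2)).sum = ft.sum := by
      have hperm : foods.Perm (PySem.List.enumerate ft) := by
        rw [hfoods]; exact PySem.List.sorted_perm _ _ _
      calc (foods.map (·.2)).sum
          = ((PySem.List.enumerate ft).map (·.2)).sum := (hperm.map (·.2)).sum_eq
        _ = ft.sum := by rw [PySem.List.map_snd_enumerate]
    have hlast : T.getD (n - 1) 0 = ft.sum := by
      rw [hT, accTail_last foods 0 0 hfne, hsum]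
      ring
    have hex : ∃ j, k ≤ T.getD j 0 := ⟨n - 1, by rw [hlast]; omega⟩
    set j0 := Nat.find hex with hj0def
    have hfind : k ≤ T.getD j0 0 := Nat.find_spec hex
    have hmin : ∀ j < j0, T.getD j 0 < k := by
      intro j hj
      have := Nat.find_min hex hj
      omega
    have hj0le : j0 ≤ n - 1 := Nat.find_min' hex (by rw [hlast]; omega)
    have hj0lt : j0 < n := by omega
    have hmono : ∀ p q : Nat, p ≤ q → q < n → T.getD p 0 ≤ T.getD q 0 := by
      intro p q hpq hq
      rcases Nat.lt_or_ge p q with hlt' | hge'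
      · have hpw : T.Pairwise (· ≤ ·) := accTail_pairwise foods 0 0 hpair
        have := (List.pairwise_iff_getElem.mp hpw) p q (by omega) (by omega) hlt'
        rw [List.getD_eq_getElem _ _ (by omega), List.getD_eq_getElem _ _ (by omega)]
        exact this
      · have : p = q := by omega
        rw [this]
    -- A's loop
    have hA : solutionLoop (foods.length : Int) foods 0 0 k =
        ((j0 : Int), k - (if j0 = 0 then 0 else T.getD (j0 - 1) 0)) := by
      have := loop_spec (foods.length : Int) foods 0 0 k j0 (by omega) hj0lt hfind hmin
      rw [this, ← hT, zero_add]
    -- B's acc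
    have hacc : (foods.foldl (fun (st : List Int × Int × Int) p =>
        (st.1 ++ [PySem.List.pyGetD st.1 (-1) 0 + (p.2 - st.2.1) * st.2.2], p.2, st.2.2 - 1))
        ([0], 0, (foods.length : Int))).1 = 0 :: T := by
      have := fold_acc_eq foods [] 0 0
      simpa using this
    -- B's binary search
    have hB : bsLoop (0 :: T) k 0 ((foods.length : Int) - 1) = (j0 : Int) := by
      apply bs_spec T k 0 _ _ (by omega) (by omega) (by omega) (by omega)
      · intro j hj1 hj2
        have : j.toNat < j0 := by omega
        exact hmin j.toNat this
      · intro j hj1 hj2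
        have h1 : j0 ≤ j.toNat := by omega
        have h2 : j.toNat < n := by omega
        exact le_trans hfind (hmono j0 j.toNat h1 h2)
    rw [hacc, hB, hA]
    have hx : PySem.List.pyGetD (0 :: T) ((j0 : Nat) : Int) 0
        = (if j0 = 0 then 0 else T.getD (j0 - 1) 0) := by
      rw [PySem.List.pyGetD_natCast]
      cases j0 with
      | zero => simp
      | succ m => simp
    rw [hx]

-- ===== VERDICT (by name: the statement is the Claim_ definition above) =====
theorem solution_spec : Claim_equal_solution := by
  intro ft k _ hpre
  exact main_eq ft k hpre
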